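-- pv_equiv track=rewrite | github.com/LVOrg/lv-file-audit-2024 | cy_jobs/vietlott_ocr_agg.py | concat_content
-- ===== SOURCE A (Python) =====
-- def concat_content(contents):
--     txt_content=" ".join([x for x in contents if x is not None])
--     for x in ['\n','\r','\t']:
--         txt_content = txt_content.replace(x, " ")
--     txt_content = txt_content.rstrip(" ").lstrip(" ")
--     while "  " in txt_content:
--         txt_content = txt_content.replace("  "," ")
--     return txt_content
-- ===== SOURCE B (Python) =====
-- def concat_content(contents):
--     # One linear scan with a prev-was-space flag instead of repeated whole-string
--     # replace passes; collapses runs of ' ', '\n', '\r', '\t' to a single space.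
--     joined = " ".join([x for x in contents if x is not None])
--     out = []
--     prev = False
--     for c in joined:
--         if c in '\n\r\t ':
--             if not prev:
--                 out.append(' ')
--             prev = True
--         else:
--             out.append(c)
--             prev = False
--     return ''.join(out).strip(' ')
-- ===== Notes on version B (the rewrite author's own statement) =====
-- stated objective: alternative
-- what changed: Replaced the per-character replace passes plus the while-loop of whole-string ' '->' ' replacements with a single character scan carrying a prev-was-space flag that collapses runs of ' ', '\n', '\r', '\t' to one space, followed by a single strip of leading/trailing spaces.
import Mathlib
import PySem

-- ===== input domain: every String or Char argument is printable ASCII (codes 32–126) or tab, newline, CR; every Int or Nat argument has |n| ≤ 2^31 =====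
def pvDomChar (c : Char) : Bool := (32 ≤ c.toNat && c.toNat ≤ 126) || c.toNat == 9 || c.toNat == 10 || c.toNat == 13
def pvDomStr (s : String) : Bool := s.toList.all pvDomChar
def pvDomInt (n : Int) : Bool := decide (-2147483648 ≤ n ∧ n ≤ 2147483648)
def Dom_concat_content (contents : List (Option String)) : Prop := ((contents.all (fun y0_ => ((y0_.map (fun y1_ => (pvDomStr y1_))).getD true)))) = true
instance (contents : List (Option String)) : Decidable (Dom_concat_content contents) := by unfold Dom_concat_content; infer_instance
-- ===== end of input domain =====

-- B replaces A's repeated whole-string replace passes and '  '->' ' while-loop with one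
-- character scan carrying a prev-was-space flag; return values agree on all inputs.

-- ===== PORT A =====
-- helper for the termination of A's `while "  " in txt` loop:
-- one pass of Python's txt.replace("  ", " ") as a direct recursion
def rep2 : List Char → List Char
  | [] => []
  | [c] => [c]
  | c :: c' :: t => if c = ' ' ∧ c' = ' ' then ' ' :: rep2 t else c :: rep2 (c' :: t)

theorem replace_go_eq_rep2 (fuel : Nat) (l acc : List Char) (h : l.length ≤ fuel) :
    PySem.Chars.replace.go [' ', ' '] [' '] fuel l acc = acc.reverse ++ rep2 l := by
  induction fuel generalizing l acc with
  | zero =>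
    have : l = [] := List.eq_nil_of_length_eq_zero (Nat.le_zero.mp h)
    subst this; simp [PySem.Chars.replace.go, rep2]
  | succ n ih =>
    match l with
    | [] => simp [PySem.Chars.replace.go, rep2]
    | [c] =>
      rw [PySem.Chars.replace.go]
      have hpre : [' ', ' '].isPrefixOf [c] = false := by
        simp [List.isPrefixOf]
      rw [hpre]
      simp only [Bool.false_eq_true, if_false]
      rw [ih [] (c :: acc) (by simp)]
      simp [rep2]
    | c :: c' :: t =>
      rw [PySem.Chars.replace.go]
      by_cases hp : [' ', ' '].isPrefixOf (c :: c' :: t) = true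
      · have hc : c = ' ' ∧ c' = ' ' := by
          have := hp; simp [List.isPrefixOf] at this
          exact ⟨this.1.symm, this.2.symm⟩
        rw [hp]
        simp only [if_true]
        obtain ⟨rfl, rfl⟩ := hc
        rw [show (([' ', ' '] : List Char).length) = 2 from rfl]
        rw [show (([' '] : List Char).reverse ++ acc) = ' ' :: acc from rfl]
        rw [show List.drop 2 (' ' :: ' ' :: t) = t from rfl]
        rw [ih t (' ' :: acc) (by simp at h ⊢; omega)]
        simp [rep2]
      · rw [Bool.not_eq_true] at hp
        rw [hp]
        simp only [Bool.false_eq_true, if_false]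
        rw [ih (c' :: t) (c :: acc) (by simp at h ⊢; omega)]
        have hne : ¬(c = ' ' ∧ c' = ' ') := by
          intro ⟨h1, h2⟩; subst h1; subst h2; simp [List.isPrefixOf] at hp
        rw [rep2, if_neg hne]
        simp

theorem replace_eq_rep2 (s : List Char) :
    PySem.Chars.replace s [' ', ' '] [' '] = rep2 s := by
  rw [PySem.Chars.replace]
  simp [replace_go_eq_rep2 s.length s [] (le_refl _)]

def hasDbl : List Char → Bool
  | [] => false
  | [_] => false
  | c :: c' :: t => (c = ' ' ∧ c' = ' ') || hasDbl (c' :: t)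

theorem hasDbl_iff_infix (s : List Char) : hasDbl s = true ↔ [' ', ' '] <:+: s := by
  induction s with
  | nil => simp [hasDbl]
  | cons c t ih =>
    cases t with
    | nil =>
      simp only [hasDbl, Bool.false_eq_true, false_iff]
      intro h
      have := h.length_le
      simp at this
    | cons c' t' =>
      rw [List.infix_cons_iff]
      constructor
      · intro h
        simp only [hasDbl, Bool.or_eq_true, decide_eq_true_eq] at h
        rcases h with ⟨rfl, rfl⟩ | h
        · exact Or.inl (by simp)
        · exact Or.inr (ih.mp h)
      · intro h
        rcases h with h | h
        · rcases h with ⟨w, hw⟩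
          simp only [List.cons_append] at hw
          injection hw with h1 h2; injection h2 with h2 _
          simp [hasDbl]
          exact Or.inl ⟨h1.symm, h2.symm⟩
        · simp [hasDbl, ih.mpr h]

theorem isIn_eq_hasDbl (s : List Char) : PySem.Chars.isIn [' ', ' '] s = hasDbl s := by
  by_cases h : [' ', ' '] <:+: s
  · rw [(PySem.Chars.isIn_iff_infix _ _).mpr h, (hasDbl_iff_infix s).mpr h]
  · rw [(PySem.Chars.isIn_eq_false_iff _ _).mpr h]
    cases hh : hasDbl s with
    | false => rfl
    | true => exact absurd ((hasDbl_iff_infix s).mp hh) h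

theorem rep2_length_le (s : List Char) : (rep2 s).length ≤ s.length := by
  fun_induction rep2 s with
  | case1 => simp [rep2]
  | case2 => simp [rep2]
  | case3 c c' t h ih => simp only [List.length_cons] at ih ⊢; omega
  | case4 c c' t h ih => simp only [List.length_cons] at ih ⊢; omega

theorem rep2_length_lt (s : List Char) (h : hasDbl s = true) : (rep2 s).length < s.length := by
  fun_induction rep2 s with
  | case1 => simp [hasDbl] at h
  | case2 => simp [hasDbl] at h
  | case3 c c' t hc ih =>
    have := rep2_length_le t
    simp only [List.length_cons] at this ⊢
    omega
  | case4 c c' t hc ih =>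
    have hd : hasDbl (c' :: t) = true := by
      cases hdd : hasDbl (c' :: t) with
      | true => rfl
      | false =>
        exfalso
        rw [hasDbl, hdd] at h
        simp at h
        exact hc h
    have := ih hd
    simp only [List.length_cons] at this ⊢
    omega

theorem replace_length_lt (s : List Char) (h : PySem.Chars.isIn [' ', ' '] s = true) :
    (PySem.Chars.replace s [' ', ' '] [' ']).length < s.length := by
  rw [replace_eq_rep2]; exact rep2_length_lt s (by rw [← isIn_eq_hasDbl]; exact h)

-- Python: while "  " in txt: txt = txt.replace("  ", " ")
def whileLoop (s : List Char) : List Char :=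
  if h : PySem.Chars.isIn [' ', ' '] s = true then
    whileLoop (PySem.Chars.replace s [' ', ' '] [' '])
  else s
termination_by s.length
decreasing_by exact replace_length_lt s h

-- exact hand ports of Python s.lstrip(" ") / s.rstrip(" "): drop only ' ' at that end
def lstripSp (cs : List Char) : List Char := cs.dropWhile (fun c => c == ' ')
def rstripSp (cs : List Char) : List Char := (cs.reverse.dropWhile (fun c => c == ' ')).reverse

def concat_content (contents : List (Option String)) : String :=
  String.ofList <|
    let txt0 := PySem.Chars.join [' '] ((contents.filterMap (fun x => x)).map String.toList)
    let txt1 := [['\n'], ['\r'], ['\t']].foldl (fun t x => PySem.Chars.replace t x [' ']) txt0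
    let txt2 := lstripSp (rstripSp txt1)
    whileLoop txt2

-- ===== PORT B =====
-- the single scan with the prev-was-space flag
def squeeze : List Char → Bool → List Char
  | [], _ => []
  | c :: t, prev =>
    if c == '\n' || c == '\r' || c == '\t' || c == ' ' then
      (if prev then squeeze t true else ' ' :: squeeze t true)
    else c :: squeeze t false

def concat_content_alt (contents : List (Option String)) : String :=
  String.ofList <|
    let joined := PySem.Chars.join [' '] ((contents.filterMap (fun x => x)).map String.toList)
    PySem.Chars.stripChars (squeeze joined false) [' ']

-- ===== PRECONDITION & SPEC =====
def Spec_concat_content (contents : List (Option String)) (out : String) : Prop := out = concat_content_alt contents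
instance (contents : List (Option String)) (out : String) : Decidable (Spec_concat_content contents out) := by unfold Spec_concat_content; infer_instance

-- ===== CLAIM (what is proved, stated in full; the proofs are below) =====
def Claim_equal_concat_content : Prop := ∀ (contents : List (Option String)), Dom_concat_content contents → Spec_concat_content contents (concat_content contents)

-- ===== LEMMAS AND PROOFS =====

-- canonical space-collapser: squeeze restricted to ' '
def col : List Char → Bool → List Char
  | [], _ => []
  | c :: t, prev =>
    if c == ' ' then (if prev then col t true else ' ' :: col t true)
    else c :: col t false

def nlmap (c : Char) : Char := if c == '\n' || c == '\r' || c == '\t' then ' ' else c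

theorem col_rep2 (u : List Char) (b : Bool) : col (rep2 u) b = col u b := by
  induction u using rep2.induct generalizing b with
  | case1 => rfl
  | case2 c => rfl
  | case3 c c' t h ih =>
    obtain ⟨rfl, rfl⟩ := h
    cases b <;> simp [rep2, col, ih]
  | case4 c c' t h ih =>
    by_cases hc : c = ' '
    · have hc' : ¬ c' = ' ' := fun h' => h ⟨hc, h'⟩
      subst hc
      cases b <;> simp [rep2, h, col, hc', ih]
    · cases b <;> simp [rep2, h, col, hc, ih]

theorem col_nodbl (u : List Char) (b : Bool) (h : hasDbl u = false)
    (hb : b = true → ∀ t, u ≠ ' ' :: t) : col u b = u := by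
  induction u generalizing b with
  | nil => rfl
  | cons c t ih =>
    by_cases hc : c = ' '
    · subst hc
      have hb' : b = false := by
        cases b
        · rfl
        · exact absurd rfl (hb rfl t)
      subst hb'
      simp only [col, beq_self_eq_true, if_true, Bool.false_eq_true, if_false]
      cases t with
      | nil => rfl
      | cons c'' t'' =>
        have h2 : ¬ c'' = ' ' := by
          intro h'
          subst h'
          simp [hasDbl] at h
        have h3 : hasDbl (c'' :: t'') = false := by
          cases hh : hasDbl (c'' :: t'') with
          | false => rfl
          | true => rw [hasDbl, hh] at h; simp at h
        rw [ih true h3 (fun _ t' he => h2 (List.cons_eq_cons.mp he).1)]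
    · have h3 : hasDbl t = false := by
        cases t with
        | nil => rfl
        | cons c'' t'' =>
          cases hh : hasDbl (c'' :: t'') with
          | false => rfl
          | true => rw [hasDbl, hh] at h; simp at h
      simp only [col, beq_eq_false_iff_ne.mpr hc, Bool.false_eq_true, if_false]
      rw [ih false h3 (by simp)]

theorem whileLoop_eq_col (u : List Char) : whileLoop u = col u false := by
  fun_induction whileLoop u with
  | case1 s h ih => rw [ih, replace_eq_rep2, col_rep2]
  | case2 s h =>
    rw [Bool.not_eq_true, isIn_eq_hasDbl] at h
    exact (col_nodbl s false h (by simp)).symm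

theorem replace_go_single (a b : Char) (fuel : Nat) (l acc : List Char) (h : l.length ≤ fuel) :
    PySem.Chars.replace.go [a] [b] fuel l acc
      = acc.reverse ++ l.map (fun c => if c == a then b else c) := by
  induction fuel generalizing l acc with
  | zero =>
    have : l = [] := List.eq_nil_of_length_eq_zero (Nat.le_zero.mp h)
    subst this; simp [PySem.Chars.replace.go]
  | succ n ih =>
    match l with
    | [] => simp [PySem.Chars.replace.go]
    | c :: t =>
      rw [PySem.Chars.replace.go]
      by_cases hp : [a].isPrefixOf (c :: t) = true
      · have hc : a = c := by simpa [List.isPrefixOf] using hp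
        subst hc
        rw [hp]
        simp only [if_true]
        rw [show (([b] : List Char).reverse ++ acc) = b :: acc from rfl]
        rw [show List.drop ([a] : List Char).length (a :: t) = t from rfl]
        rw [ih t (b :: acc) (by simp at h ⊢; omega)]
        simp
      · have hc : ¬ c = a := by
          intro h'; subst h'; simp [List.isPrefixOf] at hp
        rw [Bool.not_eq_true] at hp
        rw [hp]
        simp only [Bool.false_eq_true, if_false]
        rw [ih t (c :: acc) (by simp at h ⊢; omega)]
        simp [hc]

theorem replace_single_eq_map (s : List Char) (a b : Char) :
    PySem.Chars.replace s [a] [b] = s.map (fun c => if c == a then b else c) := by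
  rw [PySem.Chars.replace]
  simp [replace_go_single a b s.length s [] (le_refl _)]

theorem col_map_eq_squeeze (cs : List Char) (b : Bool) :
    col (cs.map nlmap) b = squeeze cs b := by
  induction cs generalizing b with
  | nil => rfl
  | cons c t ih =>
    by_cases hw : (c == '\n' || c == '\r' || c == '\t' || c == ' ') = true
    · have hnl : nlmap c = ' ' := by
        simp only [Bool.or_eq_true, beq_iff_eq] at hw
        rcases hw with ((rfl | rfl) | rfl) | rfl <;> rfl
      cases b <;> simp [squeeze, hw, List.map_cons, hnl, col, ih]
    · have hne : ¬ c = ' ' := by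
        simp only [Bool.or_eq_true, beq_iff_eq] at hw
        push_neg at hw
        exact hw.2
      have hnl : nlmap c = c := by
        simp only [Bool.or_eq_true, beq_iff_eq] at hw
        push_neg at hw
        simp [nlmap, hw.1.1.1, hw.1.1.2, hw.1.2]
      rw [Bool.not_eq_true] at hw
      simp [squeeze, hw, List.map_cons, hnl, col, hne, ih]

def endFlag : List Char → Bool → Bool
  | [], b => b
  | c :: t, _ => endFlag t (c == ' ')

theorem col_append (u v : List Char) (b : Bool) :
    col (u ++ v) b = col u b ++ col v (endFlag u b) := by
  induction u generalizing b with
  | nil => simp [col, endFlag]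
  | cons c t ih =>
    by_cases hc : c = ' '
    · subst hc
      cases b <;> simp [col, endFlag, ih]
    · have hcb : (c == ' ') = false := beq_eq_false_iff_ne.mpr hc
      simp [col, endFlag, hcb, ih]

theorem lstripSp_cons_space (x : List Char) : lstripSp (' ' :: x) = lstripSp x := by
  simp [lstripSp, List.dropWhile_cons]

theorem lstripSp_cons_ne (c : Char) (x : List Char) (hc : ¬ c = ' ') :
    lstripSp (c :: x) = c :: x := by
  simp [lstripSp, List.dropWhile_cons, hc]

theorem lstrip_col (u : List Char) (b : Bool) : lstripSp (col u b) = col u true := by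
  induction u generalizing b with
  | nil => cases b <;> rfl
  | cons c t ih =>
    by_cases hc : c = ' '
    · subst hc
      cases b with
      | false =>
        simp only [col, beq_self_eq_true, if_true, Bool.false_eq_true, if_false]
        rw [lstripSp_cons_space]
        exact ih true
      | true =>
        simp only [col, beq_self_eq_true, if_true]
        exact ih true
    · have hcb : (c == ' ') = false := beq_eq_false_iff_ne.mpr hc
      simp only [col, hcb, Bool.false_eq_true, if_false]
      exact lstripSp_cons_ne c _ hc

theorem col_lstrip (u : List Char) : col (lstripSp u) false = col u true := by
  induction u with
  | nil => rfl
  | cons c t ih =>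
    by_cases hc : c = ' '
    · subst hc
      rw [lstripSp_cons_space, ih]
      simp [col]
    · rw [lstripSp_cons_ne c t hc]
      have hcb : (c == ' ') = false := beq_eq_false_iff_ne.mpr hc
      simp [col, hcb]

theorem col_allspace (s : List Char) (b : Bool) (h : ∀ c ∈ s, c = ' ') :
    ∀ c ∈ col s b, c = ' ' := by
  induction s generalizing b with
  | nil => simp [col]
  | cons c t ih =>
    have hc : c = ' ' := h c (by simp)
    subst hc
    have ht : ∀ c ∈ t, c = ' ' := fun c hc => h c (by simp [hc])
    intro x hx
    cases b with
    | true =>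
      simp only [col, beq_self_eq_true, if_true] at hx
      exact ih true ht x hx
    | false =>
      simp only [col, beq_self_eq_true, if_true, Bool.false_eq_true, if_false] at hx
      rcases List.mem_cons.mp hx with rfl | hx'
      · rfl
      · exact ih true ht x hx'

theorem col_true_allspace (s : List Char) (h : ∀ c ∈ s, c = ' ') : col s true = [] := by
  induction s with
  | nil => rfl
  | cons c t ih =>
    have hc : c = ' ' := h c (by simp)
    subst hc
    simp [col]
    exact ih (fun c hc => h c (by simp [hc]))

theorem dropWhile_append_of_all {p : Char → Bool} (w x : List Char) (h : ∀ c ∈ w, p c = true) :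
    List.dropWhile p (w ++ x) = List.dropWhile p x := by
  induction w with
  | nil => rfl
  | cons c t ih =>
    simp only [List.cons_append, List.dropWhile_cons, h c (by simp), if_true]
    exact ih (fun c hc => h c (by simp [hc]))

theorem dropWhile_head_not {p : Char → Bool} (l : List Char) (c : Char)
    (h : (l.dropWhile p).head? = some c) : p c = false := by
  induction l with
  | nil => simp [List.dropWhile] at h
  | cons a t ih =>
    rw [List.dropWhile_cons] at h
    by_cases hp : p a = true
    · rw [hp] at h; simp at h; exact ih h
    · rw [Bool.not_eq_true] at hp
      rw [hp] at h
      simp at h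
      subst h
      exact hp

theorem rstrip_append_allspace (y z : List Char) (d : Char) (hd : y.getLast? = some d)
    (hdne : (d == ' ') = false) (hz : ∀ c ∈ z, c = ' ') : rstripSp (y ++ z) = y := by
  obtain ⟨y', rfl⟩ : ∃ y', y = y' ++ [d] := by
    rcases List.getLast?_eq_some_iff.mp hd with ⟨l, hl⟩
    exact ⟨l, hl⟩
  unfold rstripSp
  rw [List.reverse_append,
    dropWhile_append_of_all z.reverse _ (fun c hc => by
      have : c = ' ' := hz c (List.mem_reverse.mp hc)
      simp [this])]
  rw [show (y' ++ [d]).reverse = d :: y'.reverse by simp]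
  rw [List.dropWhile_cons]
  simp only [hdne, Bool.false_eq_true, if_false]
  simp

theorem col_rstrip (m : List Char) : col (rstripSp m) true = rstripSp (col m true) := by
  by_cases hall : ∀ c ∈ m, c = ' '
  · have h1 : rstripSp m = [] := by
      unfold rstripSp
      rw [List.dropWhile_eq_nil_iff.mpr (fun c hc => by
        have : c = ' ' := hall c (List.mem_reverse.mp hc)
        simp [this])]
      rfl
    rw [h1, col_true_allspace m hall]
    rfl
  · set p : Char → Bool := fun c => c == ' ' with hp
    set y : List Char := (m.reverse.dropWhile p).reverse with hy
    set z : List Char := (m.reverse.takeWhile p).reverse with hz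
    have hm : m = y ++ z := by
      conv_lhs => rw [← m.reverse_reverse, ← List.takeWhile_append_dropWhile (p := p) (l := m.reverse)]
      rw [List.reverse_append]
    have hrs : rstripSp m = y := rfl
    have hyne : y ≠ [] := by
      intro h0
      rw [hy] at h0
      have h0' : m.reverse.dropWhile p = [] := by
        simpa using congrArg List.reverse h0
      apply hall
      intro c hc
      have := List.dropWhile_eq_nil_iff.mp h0' c (List.mem_reverse.mpr hc)
      simpa [hp] using this
    obtain ⟨d, hd⟩ : ∃ d, (m.reverse.dropWhile p).head? = some d := by
      cases h0 : (m.reverse.dropWhile p).head? with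
      | none =>
        exfalso
        apply hyne
        rw [hy, List.head?_eq_none_iff.mp h0]
        rfl
      | some d => exact ⟨d, rfl⟩
    have hdlast : y.getLast? = some d := by
      rw [hy, List.getLast?_reverse]; exact hd
    have hdne : (d == ' ') = false := dropWhile_head_not (p := p) _ _ hd
    have hzall : ∀ c ∈ z, c = ' ' := by
      intro c hc
      have := List.mem_takeWhile_imp (List.mem_reverse.mp hc)
      simpa [hp] using this
    obtain ⟨y', hy'⟩ : ∃ y', y = y' ++ [d] := by
      rcases List.getLast?_eq_some_iff.mp hdlast with ⟨l, hl⟩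
      exact ⟨l, hl⟩
    have hcoly : col y true = col y' true ++ [d] := by
      rw [hy', col_append]
      congr 1
      simp [col, hdne]
    rw [hrs, hcoly, hm, col_append, hcoly]
    rw [rstrip_append_allspace (col y' true ++ [d]) _ d (by simp) hdne
      (col_allspace z _ hzall)]

theorem main_chain (m : List Char) :
    whileLoop (lstripSp (rstripSp m)) = PySem.Chars.stripChars (col m false) [' '] := by
  rw [whileLoop_eq_col, col_lstrip, col_rstrip]
  rw [PySem.Chars.stripChars]
  have hpe : (fun c => ([' '] : List Char).contains c) = (fun c => c == ' ') := by
    funext c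
    by_cases hc : c = ' ' <;> simp [hc]
  simp only [hpe]
  rw [show (List.dropWhile (fun c => c == ' ') (col m false)) = lstripSp (col m false) from rfl,
    lstrip_col]
  rfl

-- ===== VERDICT (by name: the statement is the Claim_ definition above) =====
theorem concat_content_spec : Claim_equal_concat_content := by
  intro contents _
  unfold Spec_concat_content concat_content concat_content_alt
  simp only
  congr 1
  set cs : List Char :=
    PySem.Chars.join [' '] ((contents.filterMap (fun x => x)).map String.toList) with hcs
  rw [show ([['\n'], ['\r'], ['\t']] : List (List Char)).foldl
      (fun t x => PySem.Chars.replace t x [' ']) cs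
    = PySem.Chars.replace (PySem.Chars.replace (PySem.Chars.replace cs ['\n'] [' '])
        ['\r'] [' ']) ['\t'] [' '] from rfl]
  rw [replace_single_eq_map, replace_single_eq_map, replace_single_eq_map,
    List.map_map, List.map_map]
  have hmap : (((fun c => if c == '\t' then ' ' else c) ∘ (fun c => if c == '\r' then ' ' else c))
      ∘ (fun c => if c == '\n' then ' ' else c)) = nlmap := by
    funext c
    simp only [Function.comp, nlmap]
    by_cases h1 : c = '\n'
    · subst h1; rfl
    · by_cases h2 : c = '\r'
      · subst h2; rfl
      · by_cases h3 : c = '\t'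
        · subst h3; rfl
        · simp [h1, h2, h3]
  rw [hmap, ← col_map_eq_squeeze, main_chain]
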